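-- pv_equiv track=rewrite | github.com/ever-oli/song2graph | song2graph.py | summarize_structure_labels
-- ===== SOURCE A (Python) =====
-- def summarize_structure_labels(sections):
--     labels = []
--     seen = set()
--     for section in sections:
--         label = section.get("label")
--         if label is None:
--             continue
--         label_text = str(label)
--         if label_text not in seen:
--             labels.append(label_text)
--             seen.add(label_text)
--     return labels
-- ===== SOURCE B (Python) =====
-- def summarize_structure_labels(sections):
--     labels = [str(s["label"]) for s in sections if s.get("label") is not None]
--     out = []
--     while labels:
--         head = labels[0]
--         out.append(head)
--         labels = [x for x in labels[1:] if x != head]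
--     return out
-- ===== Notes on version B (the rewrite author's own statement) =====
-- stated objective: alternative
-- what changed: Stages the work: first a comprehension extracts all labels, then first-seen uniqueness is enforced by repeatedly taking the head and filtering all its duplicates out of the remainder, so no seen-set or dict membership structure exists at all.
import Mathlib
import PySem

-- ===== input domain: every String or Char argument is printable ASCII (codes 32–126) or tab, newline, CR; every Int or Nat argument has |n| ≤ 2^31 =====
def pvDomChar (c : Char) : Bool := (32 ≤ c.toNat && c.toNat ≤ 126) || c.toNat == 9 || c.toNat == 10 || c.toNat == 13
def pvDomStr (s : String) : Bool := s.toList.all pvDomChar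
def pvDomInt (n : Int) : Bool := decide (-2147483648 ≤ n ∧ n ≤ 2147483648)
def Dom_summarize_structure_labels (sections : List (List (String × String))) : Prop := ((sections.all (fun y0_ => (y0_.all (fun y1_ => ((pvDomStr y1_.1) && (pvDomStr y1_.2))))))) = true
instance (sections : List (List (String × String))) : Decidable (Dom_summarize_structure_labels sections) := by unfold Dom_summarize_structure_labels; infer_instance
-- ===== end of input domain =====

-- B stages the work (extract all labels, then dedup by repeatedly peeling the head
-- and filtering its duplicates out of the rest) instead of A's seen-set single pass (alternative).


-- ===== PORT A =====
-- loop state: (labels, seen); str(label) is the identity on the String values here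
def summarize_structure_labels (sections : List (List (String × String))) : List String :=
  (sections.foldl
    (fun (st : List String × PySem.Set String) sec =>
      match (PySem.Dict.mk sec).get? "label" with
      | none => st
      | some label =>
        let label_text := label
        if PySem.Set.contains st.2 label_text then st
        else (st.1 ++ [label_text], PySem.Set.add st.2 label_text))
    ([], PySem.Set.empty)).1

-- ===== PORT B =====
-- the while loop: append the head to out, drop its duplicates from the rest
def pvPeelLoop (labels : List String) (out : List String) : List String :=
  match labels with
  | [] => out
  | head :: rest => pvPeelLoop (rest.filter (fun x => x != head)) (out ++ [head])
termination_by labels.length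
decreasing_by
  simpa using Nat.lt_succ_of_le (List.length_filter_le _ _)

def summarize_structure_labels_alt (sections : List (List (String × String))) : List String :=
  pvPeelLoop (sections.filterMap (fun s => (PySem.Dict.mk s).get? "label")) []

-- ===== PRECONDITION & SPEC =====
def Spec_summarize_structure_labels (sections : List (List (String × String))) (out : List String) : Prop := out = summarize_structure_labels_alt sections
instance (sections : List (List (String × String))) (out : List String) : Decidable (Spec_summarize_structure_labels sections out) := by unfold Spec_summarize_structure_labels; infer_instance

-- ===== CLAIM (what is proved, stated in full; the proofs are below) =====
def Claim_equal_summarize_structure_labels : Prop := ∀ (sections : List (List (String × String))), Dom_summarize_structure_labels sections → Spec_summarize_structure_labels sections (summarize_structure_labels sections)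

-- ===== LEMMAS AND PROOFS =====

-- A's loop with invariant "seen contains exactly the elements of labels" computes
-- the Set.add-fold of the filtered label list starting from labels.
lemma pvLoopInv (sections : List (List (String × String)))
    (labels : List String) (seen : PySem.Set String)
    (h : ∀ x, PySem.Set.contains seen x = labels.contains x) :
    (sections.foldl
      (fun (st : List String × PySem.Set String) sec =>
        match (PySem.Dict.mk sec).get? "label" with
        | none => st
        | some label =>
          let label_text := label
          if PySem.Set.contains st.2 label_text then st
          else (st.1 ++ [label_text], PySem.Set.add st.2 label_text))
      (labels, seen)).1
    = (sections.filterMap (fun sec => (PySem.Dict.mk sec).get? "label")).foldl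
        PySem.Set.add labels := by
  induction sections generalizing labels seen with
  | nil => simp
  | cons s rest ih =>
    simp only [List.foldl_cons, List.filterMap_cons]
    cases hs : (PySem.Dict.mk s).get? "label" with
    | none => exact ih labels seen h
    | some label =>
      simp only [List.foldl_cons]
      by_cases hc : PySem.Set.contains seen label = true
      · have hm : label ∈ labels := by
          have := (h label) ▸ hc; simpa using this
        simp only [hc, if_true]
        rw [ih labels seen h]
        congr 1
        simp [PySem.Set.add, hm]
      · have hm : label ∉ seen := by simpa [PySem.Set.contains] using hc
        have hml : label ∉ labels := by
          have := (h label) ▸ hc; simpa using this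
        simp only [hc, Bool.false_eq_true, if_false]
        rw [ih (labels ++ [label]) (PySem.Set.add seen label) ?_]
        · congr 1
          simp [PySem.Set.add, hml]
        · intro x
          have hx := h x
          simp [PySem.Set.add, PySem.Set.contains, hm, List.mem_append] at hx ⊢
          by_cases hxe : x = label
          · simp [hxe]
          · simp [hxe, hx]

-- the Set.add-fold equals B's peel loop on the not-yet-seen elements
lemma pvFoldPeel (xs : List String) (acc : List String) :
    xs.foldl PySem.Set.add acc
      = pvPeelLoop (xs.filter (fun x => !acc.contains x)) acc := by
  induction xs generalizing acc with
  | nil => simp [pvPeelLoop]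
  | cons x xs ih =>
    simp only [List.foldl_cons, List.filter_cons]
    by_cases hc : x ∈ acc
    · have : (!acc.contains x) = false := by simpa using hc
      rw [this]
      simp only [Bool.false_eq_true, if_false]
      rw [ih]
      congr 1
      · congr 1
        simp [PySem.Set.add, hc]
      · simp [PySem.Set.add, hc]
    · have : (!acc.contains x) = true := by simpa using hc
      rw [this]
      simp only [if_true]
      have hset : PySem.Set.add acc x = acc ++ [x] := by
        simp [PySem.Set.add, hc]
      rw [hset, pvPeelLoop, ih (acc ++ [x])]
      congr 1
      rw [List.filter_filter]
      apply List.filter_congr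
      intro y _
      by_cases hy : y = x
      · simp [hy]
      · simp [hy, bne_iff_ne]

-- ===== VERDICT (by name: the statement is the Claim_ definition above) =====
theorem summarize_structure_labels_spec : Claim_equal_summarize_structure_labels := by
  intro sections _
  unfold Spec_summarize_structure_labels summarize_structure_labels summarize_structure_labels_alt
  rw [pvLoopInv sections [] PySem.Set.empty (by intro x; rfl)]
  rw [pvFoldPeel]
  simp
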